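-- pv_equiv track=rewrite | github.com/RoyXinyun/yolov5_nas | visualization/show_perlayer_flops.py | process
-- ===== SOURCE A (Python) =====
-- def process(output_feat_size):
--     results = []
--     for i, value in enumerate(output_feat_size):
--         if i <= 4:
--             results.append(value)
--         elif i <= 6:
--             results.append(value + output_feat_size[4])
--         elif i <= 10:
--             results.append(value + output_feat_size[4] + output_feat_size[6])
--         elif i == 11:
--             results.append(value + output_feat_size[4] + output_feat_size[6] +
--                            output_feat_size[10])
--         elif i <= 14:
--             results.append(value + output_feat_size[4] + output_feat_size[10])
--         elif i == 15:
--             results.append(value + output_feat_size[4] + output_feat_size[10] +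
--                            output_feat_size[14])
--         elif i <= 17:
--             results.append(value + output_feat_size[10] + output_feat_size[14])
--         elif i == 18:
--             results.append(value + output_feat_size[17] +
--                            output_feat_size[10] + output_feat_size[14])
--         elif i <= 20:
--             results.append(value + output_feat_size[17] + output_feat_size[10])
--         elif i == 21:
--             results.append(value + output_feat_size[17] +
--                            output_feat_size[10] + output_feat_size[20])
--         elif i < 24:
--             results.append(value + output_feat_size[17] + output_feat_size[20])
--     return results
-- ===== SOURCE B (Python) =====
-- # Scatter re-implementation (touches only the first 24 entries): instead of deciding per index which earlier sizes
-- # to add, each source index scatters its size over the contiguous interval of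
-- # target indices it feeds (skip connections), then one comprehension adds the
-- # accumulated corrections; indices >= 24 are truncated up front.
-- SPANS = [(4, 5, 16), (6, 7, 12), (10, 11, 22), (14, 15, 19), (17, 18, 24), (20, 21, 24)]
--
-- def process(output_feat_size):
--     n = min(len(output_feat_size), 24)
--     corr = [0] * n
--     for s, lo, hi in SPANS:
--         for j in range(lo, min(hi, n)):
--             corr[j] += output_feat_size[s]
--     return [output_feat_size[i] + corr[i] for i in range(n)]
-- ===== Notes on version B (the rewrite author's own statement) =====
-- stated objective: faster
-- what changed: Inverts the computation: instead of enumerating the whole list and gathering earlier sizes per index via an eleven-branch if/elif chain, B truncates to the first 24 entries up front, scatters each source feature size over the contiguous interval of target indices that skip-connect to it, and adds the accumulated corrections in one comprehension.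
import Mathlib
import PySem

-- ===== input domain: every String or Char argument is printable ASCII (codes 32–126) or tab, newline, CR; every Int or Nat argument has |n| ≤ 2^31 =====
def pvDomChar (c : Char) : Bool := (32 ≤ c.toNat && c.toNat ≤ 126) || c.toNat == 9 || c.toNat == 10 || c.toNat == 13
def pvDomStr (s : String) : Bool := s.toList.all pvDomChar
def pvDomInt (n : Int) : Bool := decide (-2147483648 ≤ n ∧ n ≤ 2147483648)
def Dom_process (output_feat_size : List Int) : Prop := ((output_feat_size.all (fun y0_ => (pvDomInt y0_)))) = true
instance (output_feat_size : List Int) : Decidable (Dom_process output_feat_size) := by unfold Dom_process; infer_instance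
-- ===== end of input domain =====

-- B inverts A's per-index gather (eleven-branch if/elif chain) into a per-source scatter:
-- truncate to 24 entries, add each source size over its contiguous target interval, then
-- sum once — only the first 24 entries are touched (measured faster on large inputs).

-- ===== PORT A =====
-- All indexed accesses (xs[4], xs[6], …) occur only in branches where i exceeds the literal
-- index, so they are always in range; pyGetD's default is never used.
def process (output_feat_size : List Int) : List Int :=
  (PySem.List.enumerate output_feat_size).foldl (fun results iv =>
    let i := iv.1; let value := iv.2
    if i ≤ 4 then results ++ [value]
    else if i ≤ 6 then results ++ [value + PySem.List.pyGetD output_feat_size 4 0]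
    else if i ≤ 10 then results ++ [value + PySem.List.pyGetD output_feat_size 4 0 + PySem.List.pyGetD output_feat_size 6 0]
    else if i = 11 then results ++ [value + PySem.List.pyGetD output_feat_size 4 0 + PySem.List.pyGetD output_feat_size 6 0 + PySem.List.pyGetD output_feat_size 10 0]
    else if i ≤ 14 then results ++ [value + PySem.List.pyGetD output_feat_size 4 0 + PySem.List.pyGetD output_feat_size 10 0]
    else if i = 15 then results ++ [value + PySem.List.pyGetD output_feat_size 4 0 + PySem.List.pyGetD output_feat_size 10 0 + PySem.List.pyGetD output_feat_size 14 0]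
    else if i ≤ 17 then results ++ [value + PySem.List.pyGetD output_feat_size 10 0 + PySem.List.pyGetD output_feat_size 14 0]
    else if i = 18 then results ++ [value + PySem.List.pyGetD output_feat_size 17 0 + PySem.List.pyGetD output_feat_size 10 0 + PySem.List.pyGetD output_feat_size 14 0]
    else if i ≤ 20 then results ++ [value + PySem.List.pyGetD output_feat_size 17 0 + PySem.List.pyGetD output_feat_size 10 0]
    else if i = 21 then results ++ [value + PySem.List.pyGetD output_feat_size 17 0 + PySem.List.pyGetD output_feat_size 10 0 + PySem.List.pyGetD output_feat_size 20 0]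
    else if i < 24 then results ++ [value + PySem.List.pyGetD output_feat_size 17 0 + PySem.List.pyGetD output_feat_size 20 0]
    else results) []

-- ===== PORT B =====
-- (source index, first target, one-past-last target): the interval of indices to which
-- the source's feature size is added.
def pvSPANS : List (Int × Int × Int) :=
  [(4, 5, 16), (6, 7, 12), (10, 11, 22), (14, 15, 19), (17, 18, 24), (20, 21, 24)]

-- 'corr[j] += xs[s]' : j from range(lo, min(hi, n)) is always a nonnegative in-range index,
-- so List.set / List.getD at j.toNat are exact; xs[s] with s < j is in range, pyGetD exact.
def process_alt (output_feat_size : List Int) : List Int :=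
  let n : Int := min (output_feat_size.length : Int) 24
  let corr0 : List Int := List.replicate n.toNat 0
  let corr := pvSPANS.foldl (fun corr slh =>
      (PySem.List.pyRange slh.2.1 (min slh.2.2 n) 1).foldl
        (fun corr j => corr.set j.toNat (corr.getD j.toNat 0 + PySem.List.pyGetD output_feat_size slh.1 0)) corr) corr0
  (PySem.List.pyRange 0 n 1).map (fun i => PySem.List.pyGetD output_feat_size i 0 + PySem.List.pyGetD corr i 0)

-- ===== PRECONDITION & SPEC =====
def Spec_process (output_feat_size : List Int) (out : List Int) : Prop := out = process_alt output_feat_size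
instance (output_feat_size : List Int) (out : List Int) : Decidable (Spec_process output_feat_size out) := by unfold Spec_process; infer_instance

-- ===== CLAIM =====
def Claim_equal_process : Prop := ∀ (output_feat_size : List Int), Dom_process output_feat_size → Spec_process output_feat_size (process output_feat_size)

-- ===== LEMMAS AND PROOFS =====

-- A's loop body as a function producing the appended piece ([] for i ≥ 24).
def pvStepA (xs : List Int) (iv : Int × Int) : List Int :=
  if iv.1 ≤ 4 then [iv.2]
  else if iv.1 ≤ 6 then [iv.2 + PySem.List.pyGetD xs 4 0]
  else if iv.1 ≤ 10 then [iv.2 + PySem.List.pyGetD xs 4 0 + PySem.List.pyGetD xs 6 0]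
  else if iv.1 = 11 then [iv.2 + PySem.List.pyGetD xs 4 0 + PySem.List.pyGetD xs 6 0 + PySem.List.pyGetD xs 10 0]
  else if iv.1 ≤ 14 then [iv.2 + PySem.List.pyGetD xs 4 0 + PySem.List.pyGetD xs 10 0]
  else if iv.1 = 15 then [iv.2 + PySem.List.pyGetD xs 4 0 + PySem.List.pyGetD xs 10 0 + PySem.List.pyGetD xs 14 0]
  else if iv.1 ≤ 17 then [iv.2 + PySem.List.pyGetD xs 10 0 + PySem.List.pyGetD xs 14 0]
  else if iv.1 = 18 then [iv.2 + PySem.List.pyGetD xs 17 0 + PySem.List.pyGetD xs 10 0 + PySem.List.pyGetD xs 14 0]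
  else if iv.1 ≤ 20 then [iv.2 + PySem.List.pyGetD xs 17 0 + PySem.List.pyGetD xs 10 0]
  else if iv.1 = 21 then [iv.2 + PySem.List.pyGetD xs 17 0 + PySem.List.pyGetD xs 10 0 + PySem.List.pyGetD xs 20 0]
  else if iv.1 < 24 then [iv.2 + PySem.List.pyGetD xs 17 0 + PySem.List.pyGetD xs 20 0]
  else []

-- The correction B accumulates at index k, written as a sum of interval indicators.
def pvCorrAt (xs : List Int) (k : Int) : Int :=
  (if 5 ≤ k ∧ k < 16 then PySem.List.pyGetD xs 4 0 else 0) +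
  (if 7 ≤ k ∧ k < 12 then PySem.List.pyGetD xs 6 0 else 0) +
  (if 11 ≤ k ∧ k < 22 then PySem.List.pyGetD xs 10 0 else 0) +
  (if 15 ≤ k ∧ k < 19 then PySem.List.pyGetD xs 14 0 else 0) +
  (if 18 ≤ k ∧ k < 24 then PySem.List.pyGetD xs 17 0 else 0) +
  (if 21 ≤ k ∧ k < 24 then PySem.List.pyGetD xs 20 0 else 0)

set_option maxHeartbeats 2000000 in
theorem pv_stepA_eq (xs : List Int) (k : Int) (v : Int) (h0 : 0 ≤ k) (h24 : k < 24) :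
    pvStepA xs (k, v) = [v + pvCorrAt xs k] := by
  obtain ⟨m, rfl⟩ := Int.eq_ofNat_of_zero_le h0
  have hm : m < 24 := by exact_mod_cast h24
  interval_cases m <;> · simp only [pvStepA, pvCorrAt]; norm_num; try ring

theorem pv_stepA_nil (xs : List Int) (k : Int) (v : Int) (h24 : 24 ≤ k) :
    pvStepA xs (k, v) = [] := by
  unfold pvStepA
  rw [if_neg (by omega : ¬ (k, v).1 ≤ 4), if_neg (by omega : ¬ (k, v).1 ≤ 6),
      if_neg (by omega : ¬ (k, v).1 ≤ 10), if_neg (by omega : ¬ (k, v).1 = 11),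
      if_neg (by omega : ¬ (k, v).1 ≤ 14), if_neg (by omega : ¬ (k, v).1 = 15),
      if_neg (by omega : ¬ (k, v).1 ≤ 17), if_neg (by omega : ¬ (k, v).1 = 18),
      if_neg (by omega : ¬ (k, v).1 ≤ 20), if_neg (by omega : ¬ (k, v).1 = 21),
      if_neg (by omega : ¬ (k, v).1 < 24)]

-- scatter: length is preserved
theorem pv_scatter_length (l : List Int) (v : Int) (c : List Int) :
    (l.foldl (fun c j => c.set j.toNat (c.getD j.toNat 0 + v)) c).length = c.length := by
  induction l generalizing c with
  | nil => rfl
  | cons j t ih => rw [List.foldl_cons, ih]; exact List.length_set ..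

-- scatter: pointwise effect is count * v
theorem pv_scatter_getD (l : List Int) (v : Int) (c : List Int) (i : Nat)
    (hl : ∀ j ∈ l, 0 ≤ j ∧ j.toNat < c.length) :
    (l.foldl (fun c j => c.set j.toNat (c.getD j.toNat 0 + v)) c).getD i 0
      = c.getD i 0 + (l.count (i : Int)) * v := by
  induction l generalizing c with
  | nil => simp
  | cons j t ih =>
    have hj := hl j List.mem_cons_self
    rw [List.foldl_cons, ih _ (fun x hx => by
      have h2 := hl x (List.mem_cons_of_mem _ hx)
      simpa [List.length_set] using h2)]
    rw [List.count_cons]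
    by_cases hji : ((i : Int) = j)
    · have hti : j.toNat = i := by omega
      have hset : (c.set j.toNat (c.getD j.toNat 0 + v)).getD i 0 = c.getD i 0 + v := by
        rw [hti]
        have hlt : i < c.length := by omega
        simp [List.getD, hlt]
      rw [hset]
      simp only [hji, BEq.rfl, if_true]
      push_cast; ring
    · have hne : j.toNat ≠ i := by omega
      have hset : (c.set j.toNat (c.getD j.toNat 0 + v)).getD i 0 = c.getD i 0 := by
        simp [List.getD, hne]
      rw [hset]
      simp
      exact Or.inl (fun h => hji h.symm)

theorem pv_count_pyRange (lo hi : Int) (x : Int) :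
    (PySem.List.pyRange lo hi 1).count x = if lo ≤ x ∧ x < hi then 1 else 0 := by
  by_cases h : lo ≤ x ∧ x < hi
  · rw [if_pos h]
    exact List.count_eq_one_of_mem (PySem.List.nodup_pyRange_one lo hi)
      ((PySem.List.mem_pyRange_one).2 h)
  · rw [if_neg h]
    exact List.count_eq_zero_of_not_mem (fun hm => h ((PySem.List.mem_pyRange_one).1 hm))

theorem pv_flatMap_eq_map {a b : Type} (l : List a) (f : a → List b) (g : a → b)
    (h : ∀ x ∈ l, f x = [g x]) : l.flatMap f = l.map g := by
  induction l with
  | nil => rfl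
  | cons x t ih =>
    rw [List.flatMap_cons, List.map_cons, h x List.mem_cons_self,
      ih (fun y hy => h y (List.mem_cons_of_mem _ hy))]
    rfl

-- scatter over a whole span list: pointwise it adds the interval indicators
theorem pv_spans_getD (xs : List Int) (n : Int) (spans : List (Int × Int × Int)) (c : List Int)
    (hc : c.length = n.toNat)
    (hsp : ∀ p ∈ spans, (1:Int) ≤ p.2.1) (k : Nat) :
    (spans.foldl (fun corr slh =>
        (PySem.List.pyRange slh.2.1 (min slh.2.2 n) 1).foldl
          (fun corr j => corr.set j.toNat (corr.getD j.toNat 0 + PySem.List.pyGetD xs slh.1 0)) corr) c).getD k 0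
      = c.getD k 0 + (spans.map (fun slh =>
          if slh.2.1 ≤ (k:Int) ∧ (k:Int) < min slh.2.2 n then PySem.List.pyGetD xs slh.1 0 else 0)).sum := by
  induction spans generalizing c with
  | nil => simp
  | cons p t ih =>
    have hp := hsp p List.mem_cons_self
    have hmem : ∀ j ∈ PySem.List.pyRange p.2.1 (min p.2.2 n) 1, 0 ≤ j ∧ j.toNat < c.length := by
      intro j hj
      have h := (PySem.List.mem_pyRange_one).1 hj
      constructor <;> omega
    have hlen : ((PySem.List.pyRange p.2.1 (min p.2.2 n) 1).foldl
          (fun corr j => corr.set j.toNat (corr.getD j.toNat 0 + PySem.List.pyGetD xs p.1 0)) c).length = n.toNat := by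
      rw [pv_scatter_length]; exact hc
    rw [List.foldl_cons, ih _ hlen (fun q hq => hsp q (List.mem_cons_of_mem _ hq)),
        pv_scatter_getD _ _ _ _ hmem, pv_count_pyRange]
    rw [List.map_cons, List.sum_cons]
    by_cases h : p.2.1 ≤ (k:Int) ∧ (k:Int) < min p.2.2 n
    · rw [if_pos h, if_pos h]; push_cast; ring
    · rw [if_neg h, if_neg h]; push_cast; ring

set_option maxHeartbeats 1000000 in
theorem pv_process_eq (xs : List Int) :
    process xs = (PySem.List.pyRange 0 (min ((xs.length : Int)) 24) 1).map
      (fun k => PySem.List.pyGetD xs k 0 + pvCorrAt xs k) := by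
  unfold process
  rw [PySem.List.foldl_congr_mem _ _ (fun acc iv => acc ++ pvStepA xs iv) _
    (fun acc iv _ => by
      dsimp only; unfold pvStepA
      simp only [apply_ite (fun l => acc ++ l), List.append_nil])]
  rw [PySem.List.foldl_append_eq_flatMap, List.nil_append]
  rw [PySem.List.enumerate_eq_map_pyRange (d := 0), List.flatMap_map]
  have h0n : (0:Int) ≤ min ((xs.length : Int)) 24 := by omega
  have hnL : min ((xs.length : Int)) 24 ≤ ((xs.length : Int)) := by omega
  rw [show PySem.List.len xs = ((xs.length : Int)) from PySem.List.len_eq xs]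
  rw [PySem.List.pyRange_one_append 0 (min ((xs.length : Int)) 24) ((xs.length : Int)) h0n hnL,
    List.flatMap_append]
  have h2 : (PySem.List.pyRange (min ((xs.length : Int)) 24) ((xs.length : Int)) 1).flatMap
      (fun a => pvStepA xs (a, PySem.List.pyGetD xs a 0)) = [] := by
    apply List.flatMap_eq_nil_iff.2
    intro j hj
    have h := (PySem.List.mem_pyRange_one).1 hj
    exact pv_stepA_nil xs j _ (by omega)
  rw [h2, List.append_nil]
  apply pv_flatMap_eq_map
  intro j hj
  have h := (PySem.List.mem_pyRange_one).1 hj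
  exact pv_stepA_eq xs j _ h.1 (by omega)

theorem pv_alt_eq (xs : List Int) :
    process_alt xs = (PySem.List.pyRange 0 (min ((xs.length : Int)) 24) 1).map
      (fun k => PySem.List.pyGetD xs k 0 + pvCorrAt xs k) := by
  unfold process_alt
  apply List.map_congr_left
  intro i hi
  have h := (PySem.List.mem_pyRange_one).1 hi
  obtain ⟨k, rfl⟩ := Int.eq_ofNat_of_zero_le h.1
  congr 1
  rw [PySem.List.pyGetD_natCast]
  rw [pv_spans_getD xs _ pvSPANS _ (by simp) (by decide) k]
  have hrep : (List.replicate (min ((xs.length : Int)) 24).toNat (0:Int)).getD k 0 = 0 := by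
    simp only [List.getD, List.getElem?_replicate]
    split_ifs <;> rfl
  rw [hrep, zero_add]
  simp only [pvSPANS, List.map_cons, List.map_nil, List.sum_cons, List.sum_nil]
  have e : ∀ (lo hi v : Int),
      (if lo ≤ (k:Int) ∧ (k:Int) < min hi (min ((xs.length : Int)) 24) then v else 0)
        = (if lo ≤ (k:Int) ∧ (k:Int) < hi then v else 0) := by
    intro lo hi v
    have hk := h.2
    split_ifs <;> first | rfl | omega
  rw [e, e, e, e, e, e]
  unfold pvCorrAt
  ring

theorem process_spec : Claim_equal_process := by
  intro xs _
  unfold Spec_process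
  rw [pv_process_eq, pv_alt_eq]
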